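-- pv_equiv track=rewrite | github.com/mgunnin/multi-agent-system | src/vertical_labs/tools/content_tools.py | _cluster_topics
-- ===== SOURCE A (Python) =====
-- from typing import Dict, List, Optional, Union
--
-- def _cluster_topics(topics: List[str]) -> Dict[str, List[str]]:
--     """Group similar topics into clusters."""
--     # Simple clustering based on common words
--     clusters = {}
--     for topic in topics:
--         words = set(topic.lower().split())
--         assigned = False
--         for cluster_name, cluster_topics in clusters.items():
--             cluster_words = set(cluster_name.lower().split())
--             if len(words.intersection(cluster_words)) > 0:
--                 cluster_topics.append(topic)
--                 assigned = True
--                 break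
--         if not assigned:
--             clusters[topic] = [topic]
--     return clusters
-- ===== SOURCE B (Python) =====
-- def _cluster_topics(topics):
--     """Group similar topics into clusters (inverted word index: one pass)."""
--     clusters = {}
--     names = []       # cluster names, in creation order
--     word2idx = {}    # word -> index in names of the first cluster whose name contains it
--     for topic in topics:
--         words = topic.lower().split()
--         best = None
--         for w in words:
--             i = word2idx.get(w)
--             if i is not None and (best is None or i < best):
--                 best = i
--         if best is not None:
--             clusters[names[best]].append(topic)
--         else:
--             if topic not in clusters:
--                 idx = len(names)
--                 names.append(topic)
--                 for w in words:
--                     if w not in word2idx: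
--                         word2idx[w] = idx
--             clusters[topic] = [topic]
--     return clusters
-- ===== Notes on version B (the rewrite author's own statement) =====
-- stated objective: faster
-- what changed: Replaces the per-topic linear scan over all existing clusters with an inverted index word->index of the earliest cluster whose name contains that word, picking the minimum matching cluster index per topic in one pass.
import Mathlib
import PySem

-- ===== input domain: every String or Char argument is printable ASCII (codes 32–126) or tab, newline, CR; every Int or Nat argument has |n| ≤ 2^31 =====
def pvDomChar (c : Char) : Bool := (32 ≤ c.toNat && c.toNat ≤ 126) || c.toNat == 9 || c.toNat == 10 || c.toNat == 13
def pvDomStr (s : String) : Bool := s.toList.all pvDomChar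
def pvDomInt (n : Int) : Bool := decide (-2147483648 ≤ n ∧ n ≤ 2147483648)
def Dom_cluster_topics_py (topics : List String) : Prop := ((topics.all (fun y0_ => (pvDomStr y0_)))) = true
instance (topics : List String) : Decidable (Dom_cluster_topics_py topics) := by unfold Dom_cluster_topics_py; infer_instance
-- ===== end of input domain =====

-- B replaces A's per-topic scan over all existing clusters by an inverted index
-- word → index of the earliest cluster whose name contains that word (objective: faster).

-- ===== PORT A =====
-- set(t.lower().split())
def pvWordsSetA (t : String) : PySem.Set String :=
  PySem.Set.ofList (PySem.Str.split₀ (PySem.Str.lower t))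

-- the 'for cluster_name, cluster_topics in clusters.items(): … break' loop: first matching cluster name
def pvFindA (words : PySem.Set String) : List (String × List String) → Option String
  | [] => none
  | (name, _) :: rest =>
    if 0 < PySem.Set.len (PySem.Set.inter words (pvWordsSetA name)) then some name
    else pvFindA words rest

def pvStepA (clusters : PySem.Dict String (List String)) (topic : String) :
    PySem.Dict String (List String) :=
  match pvFindA (pvWordsSetA topic) clusters.items with
  | some name => clusters.modify name [] (fun l => l ++ [topic])   -- cluster_topics.append(topic)
  | none => clusters.insert topic [topic]                          -- clusters[topic] = [topic]

def cluster_topics_py (topics : List String) : List (String × List String) :=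
  (topics.foldl pvStepA PySem.Dict.empty).items

-- ===== PORT B =====
-- t.lower().split()
def pvWordsB (t : String) : List String := PySem.Str.split₀ (PySem.Str.lower t)

-- the 'for w in words: …' minimum-index loop over the inverted index word2idx
def pvBestB (w2i : PySem.Dict String Nat) (ws : List String) : Option Nat :=
  ws.foldl (fun best w =>
    match w2i.get? w with
    | none => best
    | some i =>
      match best with
      | none => some i
      | some b => if i < b then some i else best) none

-- the 'for w in words: if w not in word2idx: word2idx[w] = idx' loop
def pvRegB (w2i : PySem.Dict String Nat) (idx : Nat) (ws : List String) :
    PySem.Dict String Nat :=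
  ws.foldl (fun m w => if m.contains w then m else m.insert w idx) w2i

def pvStepB :
    PySem.Dict String (List String) × List String × PySem.Dict String Nat → String →
    PySem.Dict String (List String) × List String × PySem.Dict String Nat
  | (clusters, names, w2i), topic =>
    match pvBestB w2i (pvWordsB topic) with
    | some m =>
      -- names[best]: best is always an index of names, so getD is exact here
      (clusters.modify (names.getD m "") [] (fun l => l ++ [topic]), names, w2i)
    | none =>
      if clusters.contains topic then (clusters.insert topic [topic], names, w2i)
      else (clusters.insert topic [topic], names ++ [topic],
            pvRegB w2i names.length (pvWordsB topic))

def cluster_topics_py_alt (topics : List String) : List (String × List String) :=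
  (topics.foldl pvStepB (PySem.Dict.empty, [], PySem.Dict.empty)).1.items

-- ===== PRECONDITION & SPEC =====
def Spec_cluster_topics_py (topics : List String) (out : List (String × List String)) : Prop := out = cluster_topics_py_alt topics
instance (topics : List String) (out : List (String × List String)) : Decidable (Spec_cluster_topics_py topics out) := by unfold Spec_cluster_topics_py; infer_instance

-- ===== CLAIM (what is proved, stated in full; the proofs are below) =====
def Claim_equal_cluster_topics_py : Prop := ∀ (topics : List String), Dom_cluster_topics_py topics → Spec_cluster_topics_py topics (cluster_topics_py topics)

-- ===== LEMMAS AND PROOFS =====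

-- "some word of ws occurs in the name n" — the matching predicate both programs decide
def pvP (ws : List String) (n : String) : Bool := ws.any (fun w => (pvWordsB n).contains w)

-- the simulation invariant tying B's (names, word2idx) to A's dict
def pvInv (clusters : PySem.Dict String (List String)) (names : List String)
    (w2i : PySem.Dict String Nat) : Prop :=
  names = clusters.keys ∧
  ∀ w, w2i.get? w = names.findIdx? (fun n => (pvWordsB n).contains w)

theorem pvFindIdx?_lt {p : String → Bool} {l : List String} {m : Nat}
    (h : List.findIdx? p l = some m) : m < l.length := by
  induction l generalizing m with
  | nil => simp [List.findIdx?_nil] at h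
  | cons a t ih =>
    rw [List.findIdx?_cons] at h
    by_cases hp : p a = true
    · rw [if_pos hp] at h
      cases h; simp
    · rw [if_neg hp] at h
      cases ht : List.findIdx? p t with
      | none => rw [ht] at h; simp at h
      | some m' =>
        rw [ht] at h
        simp only [Option.map_some, Option.some.injEq] at h
        subst h
        have := ih ht
        simp; omega

-- A's intersection test is the Boolean any-shared-word test
theorem pvLenInter_iff (ws : List String) (n : String) :
    (0 < PySem.Set.len (PySem.Set.inter (PySem.Set.ofList ws) (pvWordsSetA n))) ↔ pvP ws n = true := by
  have hlen : PySem.Set.len (PySem.Set.inter (PySem.Set.ofList ws) (pvWordsSetA n)) =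
      ((PySem.Set.inter (PySem.Set.ofList ws) (pvWordsSetA n)).length : Int) := by
    simp [PySem.Set.len]
  rw [hlen, Int.natCast_pos, List.length_pos_iff_exists_mem]
  unfold pvP pvWordsSetA pvWordsB
  constructor
  · rintro ⟨x, hx⟩
    rw [PySem.Set.mem_inter] at hx
    rw [PySem.Set.mem_ofList, PySem.Set.mem_ofList] at hx
    exact List.any_eq_true.mpr ⟨x, hx.1, by simpa using hx.2⟩
  · intro h
    obtain ⟨x, hxw, hxn⟩ := List.any_eq_true.mp h
    exact ⟨x, (PySem.Set.mem_inter _ _ _).2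
      ⟨(PySem.Set.mem_ofList _ _).2 hxw, (PySem.Set.mem_ofList _ _).2 (by simpa using hxn)⟩⟩

-- A's first-matching-cluster scan, through findIdx? on the key list
theorem pvFindA_eq (ws : List String) (items : List (String × List String)) :
    pvFindA (PySem.Set.ofList ws) items =
      (List.findIdx? (pvP ws) (items.map Prod.fst)).map
        (fun m => (items.map Prod.fst).getD m "") := by
  induction items with
  | nil => simp [pvFindA]
  | cons p rest ih =>
    obtain ⟨name, v⟩ := p
    by_cases h : pvP ws name = true
    · unfold pvFindA
      rw [if_pos ((pvLenInter_iff ws name).2 h)]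
      simp [List.findIdx?_cons, h]
    · have h0 : ¬ (0 < PySem.Set.len (PySem.Set.inter (PySem.Set.ofList ws) (pvWordsSetA name))) :=
        fun hc => h ((pvLenInter_iff ws name).1 hc)
      unfold pvFindA
      rw [if_neg h0, ih]
      simp only [List.map_cons, List.findIdx?_cons, h, if_false, Bool.false_eq_true, Option.map_map]
      cases hf : List.findIdx? (pvP ws) (rest.map Prod.fst) <;> simp

-- B's min loop is min? of the looked-up indices
theorem pvBestB_eq_min? (w2i : PySem.Dict String Nat) (ws : List String) :
    pvBestB w2i ws = (ws.filterMap (fun w => w2i.get? w)).min? := by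
  have h1 : ∀ (l : List String) (acc : Option Nat),
      l.foldl (fun best w =>
        match w2i.get? w with
        | none => best
        | some i =>
          match best with
          | none => some i
          | some b => if i < b then some i else best) acc
      = (l.filterMap (fun w => w2i.get? w)).foldl
          (fun best i =>
            match best with
            | none => some i
            | some b => if i < b then some i else best) acc := by
    intro l
    induction l with
    | nil => intro acc; rfl
    | cons w l ih =>
      intro acc
      rw [List.foldl_cons, List.filterMap_cons]
      cases hg : w2i.get? w with
      | none => exact ih acc
      | some i => simp only [List.foldl_cons]; exact ih _
  have h2 : ∀ (l : List Nat) (b : Nat),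
      l.foldl (fun best i =>
        match best with
        | none => some i
        | some b => if i < b then some i else best) (some b) = some (l.foldl min b) := by
    intro l
    induction l with
    | nil => intro b; rfl
    | cons i l ih =>
      intro b
      rw [List.foldl_cons, List.foldl_cons]
      have hstep : ((if i < b then some i else some b) : Option Nat) = some (min b i) := by
        rcases Nat.lt_or_ge i b with hlt | hge
        · rw [if_pos hlt]; simp only [Option.some.injEq]; omega
        · rw [if_neg (by omega)]; simp only [Option.some.injEq]; omega
      show l.foldl _ (if i < b then some i else some b) = _
      rw [hstep, ih (min b i)]
  unfold pvBestB
  rw [h1]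
  cases hl : ws.filterMap (fun w => w2i.get? w) with
  | nil => rfl
  | cons a l =>
    rw [List.foldl_cons]
    show l.foldl _ (some a) = _
    rw [h2]
    rfl

theorem pvMin?_map_succ (l : List Nat) :
    (l.map (fun i => i + 1)).min? = (l.min?).map (fun i => i + 1) := by
  cases hl : l.min? with
  | none =>
    rw [List.min?_eq_none_iff] at hl
    subst hl
    rfl
  | some m =>
    obtain ⟨hm, hle⟩ := List.min?_eq_some_iff.mp hl
    simp only [Option.map_some]
    apply List.min?_eq_some_iff.mpr
    refine ⟨List.mem_map.mpr ⟨m, hm, rfl⟩, ?_⟩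
    intro b hb
    obtain ⟨x, hx, rfl⟩ := List.mem_map.mp hb
    have := hle x hx
    omega

-- min over words of first-cluster-index = first cluster index matching any word
theorem pvMin_firstIdx (ws names : List String) :
    (ws.filterMap (fun w => names.findIdx? (fun n => (pvWordsB n).contains w))).min? =
      names.findIdx? (pvP ws) := by
  induction names with
  | nil => simp
  | cons n rest ih =>
    by_cases hp : pvP ws n = true
    · rw [List.findIdx?_cons, if_pos hp]
      obtain ⟨w, hww, hwn⟩ := List.any_eq_true.mp hp
      apply List.min?_eq_some_iff.mpr
      refine ⟨?_, fun b _ => Nat.zero_le b⟩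
      exact List.mem_filterMap.mpr ⟨w, hww, by rw [List.findIdx?_cons, if_pos hwn]⟩
    · have hall : ∀ w ∈ ws, ((pvWordsB n).contains w) = false := by
        intro w hww
        by_contra hc
        exact hp (List.any_eq_true.mpr ⟨w, hww, by simpa using hc⟩)
      have hcong : ws.filterMap (fun w => (n :: rest).findIdx? (fun x => (pvWordsB x).contains w))
          = (ws.filterMap (fun w => rest.findIdx? (fun x => (pvWordsB x).contains w))).map
              (fun i => i + 1) := by
        rw [List.map_filterMap]
        apply List.filterMap_congr
        intro w hww
        rw [List.findIdx?_cons, if_neg (by rw [hall w hww]; exact Bool.false_ne_true)]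
      rw [hcong, List.findIdx?_cons, if_neg hp, ← ih]
      exact pvMin?_map_succ _

-- lookups in the register loop's result
theorem pvRegB_get? (ws : List String) (idx : Nat) (w2i : PySem.Dict String Nat) (w : String) :
    (pvRegB w2i idx ws).get? w =
      (w2i.get? w).or (if ws.contains w then some idx else none) := by
  induction ws generalizing w2i with
  | nil => simp [pvRegB]
  | cons v ws ih =>
    unfold pvRegB at ih ⊢
    rw [List.foldl_cons]
    by_cases hv : w2i.contains v = true
    · rw [if_pos hv, ih]
      by_cases hwv : w = v
      · subst hwv
        have hs : (w2i.get? w).isSome := by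
          rw [PySem.Dict.contains_eq_isSome_get?] at hv; exact hv
        cases hg : w2i.get? w with
        | none => rw [hg] at hs; simp at hs
        | some i => simp
      · have hcc : (v :: ws).contains w = ws.contains w := by
          simp [hwv]
        rw [hcc]
    · rw [if_neg hv, ih]
      have hnone : w2i.get? v = none := (PySem.Dict.get?_eq_none_iff_contains _ _).2 (by simpa using hv)
      by_cases hwv : w = v
      · subst hwv
        rw [PySem.Dict.get?_insert, if_pos rfl, hnone]
        simp
      · rw [PySem.Dict.get?_insert, if_neg hwv]
        simp [hwv]

-- one step of the simulation
theorem pvStep_sim (topic : String) (clusters : PySem.Dict String (List String))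
    (names : List String) (w2i : PySem.Dict String Nat) (h : pvInv clusters names w2i) :
    (pvStepB (clusters, names, w2i) topic).1 = pvStepA clusters topic ∧
      pvInv (pvStepB (clusters, names, w2i) topic).1
        (pvStepB (clusters, names, w2i) topic).2.1 (pvStepB (clusters, names, w2i) topic).2.2 := by
  obtain ⟨hn, hw⟩ := h
  have hbestEq : pvBestB w2i (pvWordsB topic) =
      List.findIdx? (pvP (pvWordsB topic)) names := by
    rw [pvBestB_eq_min?, List.filterMap_congr (fun w _ => hw w)]
    exact pvMin_firstIdx _ _
  have hkeys : clusters.items.map Prod.fst = names := by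
    rw [hn]; rfl
  have hfind : pvFindA (pvWordsSetA topic) clusters.items =
      (List.findIdx? (pvP (pvWordsB topic)) names).map (fun m => names.getD m "") := by
    have h' := pvFindA_eq (pvWordsB topic) clusters.items
    rw [hkeys] at h'
    exact h'
  cases hbest : List.findIdx? (pvP (pvWordsB topic)) names with
  | some m =>
    have hBB : pvStepB (clusters, names, w2i) topic =
        (clusters.modify (names.getD m "") [] (fun l => l ++ [topic]), names, w2i) := by
      simp only [pvStepB, hbestEq, hbest]
    have hAA : pvStepA clusters topic =
        clusters.modify (names.getD m "") [] (fun l => l ++ [topic]) := by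
      simp only [pvStepA, hfind, hbest, Option.map_some]
    rw [hBB, hAA]
    refine ⟨rfl, ?_, hw⟩
    have hm : m < names.length := pvFindIdx?_lt hbest
    have hmem : names.getD m "" ∈ names := by
      rw [List.getD_eq_getElem?_getD, List.getElem?_eq_getElem hm]
      exact List.mem_of_getElem rfl
    have hcont : clusters.contains (names.getD m "") = true := by
      rw [PySem.Dict.contains_iff_mem_keys, ← hn]; exact hmem
    rw [PySem.Dict.keys_modify, PySem.Dict.keys_insert_of_contains _ _ hcont]
    exact hn
  | none =>
    have hBnone : pvBestB w2i (pvWordsB topic) = none := by rw [hbestEq, hbest]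
    have hAA : pvStepA clusters topic = clusters.insert topic [topic] := by
      simp only [pvStepA, hfind, hbest, Option.map_none]
    by_cases hc : clusters.contains topic = true
    · have hBB : pvStepB (clusters, names, w2i) topic =
          (clusters.insert topic [topic], names, w2i) := by
        simp only [pvStepB, hBnone, hc, if_true]
      rw [hBB, hAA]
      refine ⟨rfl, ?_, hw⟩
      rw [PySem.Dict.keys_insert_of_contains _ _ hc]
      exact hn
    · have hcf : clusters.contains topic = false := by simpa using hc
      have hBB : pvStepB (clusters, names, w2i) topic =
          (clusters.insert topic [topic], names ++ [topic],
            pvRegB w2i names.length (pvWordsB topic)) := by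
        simp only [pvStepB, hBnone, hcf]
        simp
      rw [hBB, hAA]
      refine ⟨rfl, ?_, ?_⟩
      · rw [PySem.Dict.keys_insert_of_not_contains _ _ hcf, hn]
      · intro w
        rw [pvRegB_get?, hw w, List.findIdx?_append]
        have h2 : (if (pvWordsB topic).contains w then some names.length else none : Option Nat)
            = Option.map (fun i => i + names.length)
                (List.findIdx? (fun n => (pvWordsB n).contains w) [topic]) := by
          rw [List.findIdx?_cons]
          by_cases hcw : ((pvWordsB topic).contains w) = true
          · rw [if_pos hcw, if_pos hcw]
            simp
          · rw [if_neg hcw, if_neg hcw]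
            simp
        rw [h2]

theorem pvFold_sim (topics : List String) (clusters : PySem.Dict String (List String))
    (names : List String) (w2i : PySem.Dict String Nat) (h : pvInv clusters names w2i) :
    (topics.foldl pvStepB (clusters, names, w2i)).1 = topics.foldl pvStepA clusters := by
  induction topics generalizing clusters names w2i with
  | nil => rfl
  | cons t ts ih =>
    rw [List.foldl_cons, List.foldl_cons]
    obtain ⟨heq, hinv⟩ := pvStep_sim t clusters names w2i h
    rcases hst : pvStepB (clusters, names, w2i) t with ⟨c', n', w'⟩
    rw [hst] at heq hinv
    simp only at heq hinv
    rw [← heq]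
    exact ih c' n' w' hinv

-- ===== VERDICT (by name: the statement is the Claim_ definition above) =====
theorem cluster_topics_py_spec : Claim_equal_cluster_topics_py := by
  intro topics _
  unfold Spec_cluster_topics_py cluster_topics_py cluster_topics_py_alt
  rw [pvFold_sim topics PySem.Dict.empty [] PySem.Dict.empty]
  constructor
  · simp
  · intro w
    simp [PySem.Dict.get?_empty]
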